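-- pv_equiv track=rewrite | github.com/NathanKrupa/gaudi | tests/fixtures/python/ARCH-013/pass_not_an_entry_point.py | transform
-- ===== SOURCE A (Python) =====
-- def transform(rows):
--     cleaned = [r.strip() for r in rows]
--     filtered = [r for r in cleaned if r]
--     counts = {}
--     for r in filtered:
--         counts[r] = counts.get(r, 0) + 1
--     sorted_pairs = sorted(counts.items(), key=lambda kv: -kv[1])
--     keys = [k for k, _ in sorted_pairs]
--     values = [v for _, v in sorted_pairs]
--     pairs = list(zip(keys, values))
--     out = []
--     for p in pairs:
--         out.append(f"{p[0]}\t{p[1]}")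
--     out.append("--end--")
--     out.append("--final--")
--     return "\n".join(out)
-- ===== SOURCE B (Python) =====
-- def transform(rows):
--     counts = {}
--     for r in rows:
--         s = r.strip()
--         if s:
--             counts[s] = counts.get(s, 0) + 1
--     max_count = 0
--     for v in counts.values():
--         if v > max_count:
--             max_count = v
--     buckets = {}
--     for k, v in counts.items():
--         buckets.setdefault(v, []).append(k)
--     out = []
--     for c in range(max_count, 0, -1):
--         for k in buckets.get(c, []):
--             out.append(f"{k}\t{c}")
--     out.append("--end--")
--     out.append("--final--")
--     return "\n".join(out)
-- ===== Notes on version B (the rewrite author's own statement) =====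
-- stated objective: alternative
-- what changed: B replaces A's comparison sort of (key,count) pairs by a counting/bucket sort: one pass fuses strip+filter+count, buckets keyed by frequency are filled in first-appearance order, and the output is emitted by walking frequencies from the maximum down to 1.
import Mathlib
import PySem

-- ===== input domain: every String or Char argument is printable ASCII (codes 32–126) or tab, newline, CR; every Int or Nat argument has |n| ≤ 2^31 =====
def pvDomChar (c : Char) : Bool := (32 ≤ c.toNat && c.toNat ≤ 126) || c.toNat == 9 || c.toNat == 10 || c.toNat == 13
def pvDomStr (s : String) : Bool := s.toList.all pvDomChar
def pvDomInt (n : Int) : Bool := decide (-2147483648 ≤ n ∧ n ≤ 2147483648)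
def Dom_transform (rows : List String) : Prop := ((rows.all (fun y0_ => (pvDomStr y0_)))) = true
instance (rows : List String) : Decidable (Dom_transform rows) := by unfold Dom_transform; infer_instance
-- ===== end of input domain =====

-- B replaces A's stable comparison sort of the (key, count) items by a frequency bucket sort (alternative algorithm, same return value).

-- ===== PORT A =====
def transform (rows : List String) : String :=
  let cleaned := rows.map (fun r => PySem.Str.strip r)
  let filtered := cleaned.filter (fun r => decide (r ≠ ""))
  let counts := filtered.foldl (fun d r => d.insert r (d.getD r 0 + 1)) PySem.Dict.empty
  let sorted_pairs := PySem.List.sorted counts.items (fun kv => -kv.2)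
  let keys := sorted_pairs.map (fun kv => kv.1)
  let values := sorted_pairs.map (fun kv => kv.2)
  let pairs := keys.zip values
  let out := pairs.foldl (fun acc p => acc ++ [p.1 ++ "\t" ++ PySem.Int.toStr p.2]) []
  let out2 := out ++ ["--end--"] ++ ["--final--"]
  PySem.Str.join "\n" out2

-- ===== PORT B =====
def transform_alt (rows : List String) : String :=
  let counts := rows.foldl (fun d r =>
    let s := PySem.Str.strip r
    if s ≠ "" then d.insert s (d.getD s 0 + 1) else d) PySem.Dict.empty
  let maxCount := counts.values.foldl (fun m v => if v > m then v else m) 0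
  let buckets := counts.items.foldl (fun d p => d.modify p.2 [] (· ++ [p.1])) PySem.Dict.empty
  let out := (PySem.List.pyRange maxCount 0 (-1)).foldl (fun acc c =>
    (buckets.getD c []).foldl (fun acc2 k => acc2 ++ [k ++ "\t" ++ PySem.Int.toStr c]) acc) []
  let out2 := out ++ ["--end--"] ++ ["--final--"]
  PySem.Str.join "\n" out2

-- ===== PRECONDITION & SPEC =====
def Spec_transform (rows : List String) (out : String) : Prop := out = transform_alt rows
instance (rows : List String) (out : String) : Decidable (Spec_transform rows out) := by unfold Spec_transform; infer_instance

-- ===== CLAIM (what is proved, stated in full; the proofs are below) =====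
def Claim_equal_transform : Prop := ∀ (rows : List String), Dom_transform rows → Spec_transform rows (transform rows)

-- ===== LEMMAS AND PROOFS =====

theorem insertBy_skip {α : Type} (bf : α → α → Bool) (x : α) (l₁ l₂ : List α)
    (h : ∀ y ∈ l₁, bf x y = false) :
    PySem.List.insertBy bf x (l₁ ++ l₂) = l₁ ++ PySem.List.insertBy bf x l₂ := by
  induction l₁ with
  | nil => simp
  | cons a t ih =>
    simp only [List.cons_append, PySem.List.insertBy]
    rw [h a (by simp)]
    simp [ih (fun y hy => h y (by simp [hy]))]

theorem insertBy_all_before {α : Type} (bf : α → α → Bool) (x : α) (l : List α)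
    (h : ∀ y ∈ l, bf x y = true) :
    PySem.List.insertBy bf x l = x :: l := by
  cases l with
  | nil => rfl
  | cons a t => simp [PySem.List.insertBy, h a (by simp)]

-- bucket characterisation of Python's stable sort with key -(g x): buckets listed in DESCENDING g-value order
theorem sorted_neg_buckets {α : Type} (g : α → Int) (cs : List Int)
    (hcs : cs.Pairwise (· > ·)) (xs : List α) (hcov : ∀ x ∈ xs, g x ∈ cs) :
    PySem.List.sorted xs (fun x => -(g x)) =
      cs.flatMap (fun c => xs.filter (fun x => g x == c)) := by
  rw [PySem.List.sorted_eq_foldl_insertBy]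
  induction xs using List.reverseRecOn with
  | nil => simp
  | append_singleton xs x ih =>
    rw [List.foldl_append]
    simp only [List.foldl_cons, List.foldl_nil]
    rw [ih (fun y hy => hcov y (by simp [hy]))]
    have hx : g x ∈ cs := hcov x (by simp)
    clear ih hcov
    induction cs with
    | nil => simp at hx
    | cons c cs' ihc =>
      have hpw' : cs'.Pairwise (· > ·) := hcs.tail
      have hlt : ∀ c' ∈ cs', c' < c := fun c' hc' => (List.pairwise_cons.mp hcs).1 c' hc'
      simp only [List.flatMap_cons]
      by_cases hkc : g x = c
      · rw [insertBy_skip _ _ _ _ (by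
          intro y hy
          simp only [List.mem_filter, beq_iff_eq] at hy
          simp [hy.2, hkc])]
        rw [insertBy_all_before _ _ _ (by
          intro y hy
          simp only [List.mem_flatMap, List.mem_filter, beq_iff_eq] at hy
          obtain ⟨c', hc', -, hgy⟩ := hy
          have := hlt c' hc'
          simp only [decide_eq_true_eq]
          omega)]
        rw [List.filter_append]
        have h1 : List.filter (fun y => g y == c) [x] = [x] := by simp [hkc]
        rw [h1]
        have h2 : cs'.flatMap (fun c' => (xs ++ [x]).filter (fun y => g y == c')) =
            cs'.flatMap (fun c' => xs.filter (fun y => g y == c')) := by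
          apply List.flatMap_congr
          intro c' hc'
          rw [List.filter_append]
          have := hlt c' hc'
          have : List.filter (fun y => g y == c') [x] = [] := by
            simp only [List.filter_cons, List.filter_nil, beq_iff_eq]
            rw [if_neg (by omega)]
          simp [this]
        rw [h2]
        simp
      · have hx' : g x ∈ cs' := by
          cases hx with
          | head => exact absurd rfl hkc
          | tail _ h => exact h
        have hxlt : g x < c := hlt _ hx'
        rw [insertBy_skip _ _ _ _ (by
          intro y hy
          simp only [List.mem_filter, beq_iff_eq] at hy
          simp only [decide_eq_false_iff_not, not_lt, hy.2]
          omega)]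
        rw [ihc hpw' hx']
        rw [List.filter_append]
        have h1 : List.filter (fun y => g y == c) [x] = [] := by
          simp only [List.filter_cons, List.filter_nil, beq_iff_eq]
          rw [if_neg (by omega)]
        simp [h1]

theorem pyRange_desc (m : Int) :
    PySem.List.pyRange m 0 (-1) = (List.range m.toNat).map (fun k : Nat => m + (-1) * (k : Int)) := by
  unfold PySem.List.pyRange
  norm_num
  by_cases h : (0 : Int) < m
  · rw [if_pos h]
  · rw [if_neg h]
    have h0 : m.toNat = 0 := by omega
    rw [h0]

theorem pyRange_desc_pairwise (m : Int) : (PySem.List.pyRange m 0 (-1)).Pairwise (· > ·) := by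
  rw [pyRange_desc]
  apply List.Pairwise.map (R := (· < ·)) _ _ List.pairwise_lt_range
  intro a b hab
  simp only [gt_iff_lt]
  omega

theorem mem_pyRange_desc (m c : Int) (h1 : 1 ≤ c) (h2 : c ≤ m) :
    c ∈ PySem.List.pyRange m 0 (-1) := by
  rw [pyRange_desc]
  have hk : (m - c).toNat ∈ List.range m.toNat := List.mem_range.mpr (by omega)
  have he : m + (-1) * (((m - c).toNat : Nat) : Int) = c := by omega
  exact List.mem_map.mpr ⟨_, hk, he⟩

theorem foldl_strip_filter (l : List String) (d : PySem.Dict String Int) :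
    l.foldl (fun d s => if s ≠ "" then d.insert s (d.getD s 0 + 1) else d) d =
    (l.filter (fun r => decide (r ≠ ""))).foldl (fun d r => d.insert r (d.getD r 0 + 1)) d := by
  induction l generalizing d with
  | nil => rfl
  | cons a t ih =>
    simp only [List.foldl_cons, List.filter_cons]
    by_cases h : a = ""
    · rw [if_neg (by simp [h]), if_neg (by simp [h])]
      exact ih d
    · rw [if_pos h, if_pos (by simp [h])]
      simp only [List.foldl_cons]
      exact ih _

theorem zip_fst_snd {α β : Type} (l : List (α × β)) :
    (l.map Prod.fst).zip (l.map Prod.snd) = l := by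
  induction l with
  | nil => rfl
  | cons a t ih => simp [ih]

theorem transform_eq_alt : ∀ (rows : List String), transform rows = transform_alt rows := by
  intro rows
  unfold transform transform_alt
  simp only []
  set filtered := (rows.map (fun r => PySem.Str.strip r)).filter (fun r => decide (r ≠ "")) with hf
  -- B's fused strip/filter/count loop builds the same dict as A's count loop over `filtered`
  have hcounts : rows.foldl (fun d r =>
      if PySem.Str.strip r ≠ "" then
        d.insert (PySem.Str.strip r) (d.getD (PySem.Str.strip r) 0 + 1) else d)
      (PySem.Dict.empty : PySem.Dict String Int) =
      filtered.foldl (fun d r => d.insert r (d.getD r 0 + 1)) PySem.Dict.empty := by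
    have h0 : rows.foldl (fun d r =>
        if PySem.Str.strip r ≠ "" then
          d.insert (PySem.Str.strip r) (d.getD (PySem.Str.strip r) 0 + 1) else d)
        (PySem.Dict.empty : PySem.Dict String Int) =
        (rows.map (fun r => PySem.Str.strip r)).foldl
          (fun d s => if s ≠ "" then d.insert s (d.getD s 0 + 1) else d) PySem.Dict.empty := by
      rw [List.foldl_map]
    rw [h0]
    exact foldl_strip_filter _ _
  rw [hcounts, PySem.Dict.foldl_insert_getD_add_one_eq_counter]
  set cnt := PySem.Dict.counter filtered with hcnt
  set m := cnt.values.foldl (fun m v => if v > m then v else m) 0 with hm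
  -- the running-max loop is a fold of `max`
  have hmax : m = cnt.values.foldl (fun acc v => max acc v) 0 := by
    rw [hm]
    congr 1
    funext a v
    by_cases h : v > a
    · rw [if_pos h, max_eq_right (le_of_lt h)]
    · rw [if_neg h, max_eq_left (not_lt.mp h)]
  have hmfacts := PySem.List.le_foldl_max_int cnt.values (fun v => v) 0
  -- every stored count lies between 1 and the running max
  have hcb : ∀ p ∈ cnt.items, 1 ≤ p.2 ∧ p.2 ≤ m := by
    intro p hp
    constructor
    · rw [hcnt, PySem.Dict.items_counter] at hp
      obtain ⟨k, hk, rfl⟩ := List.mem_map.mp hp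
      have hmem : k ∈ filtered := (PySem.Set.mem_ofList filtered k).mp hk
      have hpos := List.count_pos_iff.mpr hmem
      show (1 : Int) ≤ (List.count k filtered : Int)
      exact_mod_cast hpos
    · have hv : p.2 ∈ cnt.values := by
        simp only [PySem.Dict.values]
        exact List.mem_map.mpr ⟨p, hp, rfl⟩
      rw [hmax]
      exact hmfacts.2 p.2 hv
  -- bucket characterisation of A's stable sort
  have hsorted : PySem.List.sorted cnt.items (fun kv => -kv.2) =
      (PySem.List.pyRange m 0 (-1)).flatMap
        (fun c => cnt.items.filter (fun p => p.2 == c)) :=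
    sorted_neg_buckets (fun p => p.2) _ (pyRange_desc_pairwise m) cnt.items
      (fun p hp => mem_pyRange_desc m p.2 (hcb p hp).1 (hcb p hp).2)
  -- B's bucket dict looks up to the per-frequency filter
  have hbucket : ∀ c : Int,
      (cnt.items.foldl (fun d p => d.modify p.2 [] (· ++ [p.1])) PySem.Dict.empty).getD c [] =
      (cnt.items.filter (fun p => p.2 == c)).map (fun p => p.1) := by
    intro c
    have h0 : cnt.items.foldl (fun d p => d.modify p.2 [] (· ++ [p.1])) PySem.Dict.empty =
        (cnt.items.map (fun p : String × Int => (p.2, p.1))).foldl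
          (fun d (q : Int × String) => d.modify q.1 [] (· ++ [q.2])) PySem.Dict.empty := by
      rw [List.foldl_map]
    rw [h0, PySem.Dict.getD_foldl_modify_append]
    simp [List.filter_map, List.map_map, Function.comp_def]
  rw [zip_fst_snd]
  congr 1
  congr 1
  congr 1
  -- both line lists are the concatenation of the per-frequency buckets
  simp only [PySem.List.foldl_append_eq_flatMap, List.nil_append, hsorted, hbucket]
  rw [List.flatMap_assoc]
  apply List.flatMap_congr
  intro c _
  rw [List.flatMap_map]
  apply List.flatMap_congr
  intro p hp
  have : p.2 = c := by
    have := (List.mem_filter.mp hp).2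
    simpa using this
  simp [this]

-- ===== VERDICT (by name: the statement is the Claim_ definition above) =====
theorem transform_spec : Claim_equal_transform := by
  intro rows _
  exact transform_eq_alt rows
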